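-- pv_equiv track=rewrite | github.com/mannyrayner/C-LARA | questionnaire_postprocessing/image_questionnaires/csv2latex_with_stats_v2.py | order_projects
-- ===== SOURCE A (Python) =====
-- def order_projects(keys, order_hint, abbrev):
--     short2full = {s: f for f, s in abbrev.items()}
--     seen, out  = set(), []
--     for short in order_hint:
--         full = short2full.get(short)
--         if full in keys and full not in seen:
--             out.append(full);  seen.add(full)
--     out += sorted(k for k in keys if k not in seen)
--     return out
-- ===== SOURCE B (Python) =====
-- def order_projects(keys, order_hint, abbrev):
--     short2full = {s: f for f, s in abbrev.items()}
--     pos = {}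
--     for i, short in enumerate(order_hint):
--         full = short2full.get(short)
--         if full is not None and full not in pos:
--             pos[full] = i
--     hinted = sorted({k for k in keys if k in pos}, key=lambda k: pos[k])
--     rest = sorted(k for k in keys if k not in pos)
--     return hinted + rest
-- ===== Notes on version B (the rewrite author's own statement) =====
-- stated objective: faster
-- what changed: B replaces A's hint loop (which scans the keys list for membership on every hint entry and maintains a seen set) with a first-occurrence index map built over the hint, a set comprehension of hinted keys sorted by that index, and a sorted comprehension for the remaining keys.
import Mathlib
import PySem

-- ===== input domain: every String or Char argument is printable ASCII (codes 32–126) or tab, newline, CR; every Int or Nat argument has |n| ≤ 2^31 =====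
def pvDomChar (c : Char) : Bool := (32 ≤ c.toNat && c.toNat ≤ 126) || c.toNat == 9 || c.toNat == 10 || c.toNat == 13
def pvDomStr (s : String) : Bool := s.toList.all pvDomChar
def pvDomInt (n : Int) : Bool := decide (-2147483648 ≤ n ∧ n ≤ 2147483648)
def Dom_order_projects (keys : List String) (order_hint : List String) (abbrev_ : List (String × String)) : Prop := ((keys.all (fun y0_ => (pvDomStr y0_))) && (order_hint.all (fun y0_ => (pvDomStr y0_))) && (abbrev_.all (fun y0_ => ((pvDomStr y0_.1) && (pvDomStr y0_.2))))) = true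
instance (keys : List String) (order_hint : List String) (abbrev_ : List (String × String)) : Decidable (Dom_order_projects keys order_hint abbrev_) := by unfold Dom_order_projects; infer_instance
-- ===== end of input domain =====

-- B replaces A's hint loop (with its O(k) membership scan of keys per hint entry and a seen set)
-- by a first-occurrence index map over the hint, a set comprehension sorted by that index for
-- the hinted part, and a sorted comprehension for the rest; measured faster.

-- ===== PORT A =====
-- short2full = {s: f for f, s in abbrev.items()}   (identical line in A and B)
def pvShort2Full (abbrev_ : List (String × String)) : PySem.Dict String String :=
  (PySem.Dict.ofList abbrev_).items.foldl (fun d fs => d.insert fs.2 fs.1) PySem.Dict.empty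

def order_projects (keys : List String) (order_hint : List String) (abbrev_ : List (String × String)) : List String :=
  let short2full := pvShort2Full abbrev_
  let st := order_hint.foldl (fun (st : PySem.Set String × List String) short =>
    match short2full.get? short with
    | some full => if full ∈ keys ∧ full ∉ st.1 then (PySem.Set.add st.1 full, st.2 ++ [full]) else st
    | none => st) (PySem.Set.empty, [])
  st.2 ++ PySem.List.sorted (keys.filter (fun k => !(PySem.Set.contains st.1 k))) (fun x => x) false

-- ===== PORT B =====
def order_projects_alt (keys : List String) (order_hint : List String) (abbrev_ : List (String × String)) : List String :=
  let short2full := pvShort2Full abbrev_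
  let pos := (PySem.List.enumerate order_hint).foldl (fun (d : PySem.Dict String Int) p =>
    match short2full.get? p.2 with
    | some f => if ¬ d.contains f then d.insert f p.1 else d
    | none => d) PySem.Dict.empty
  -- pos[k]: every element of the set satisfies 'k in pos', so the getD default is never used
  let hinted := PySem.List.sorted (PySem.Set.ofList (keys.filter (fun k => pos.contains k)))
      (fun k => pos.getD k 0) false
  let rest := PySem.List.sorted (keys.filter (fun k => !pos.contains k)) (fun x => x) false
  hinted ++ rest

-- ===== PRECONDITION & SPEC =====
def Spec_order_projects (keys : List String) (order_hint : List String) (abbrev_ : List (String × String)) (out : List String) : Prop := out = order_projects_alt keys order_hint abbrev_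
instance (keys : List String) (order_hint : List String) (abbrev_ : List (String × String)) (out : List String) : Decidable (Spec_order_projects keys order_hint abbrev_ out) := by unfold Spec_order_projects; infer_instance

-- ===== CLAIM (what is proved, stated in full; the proofs are below) =====
def Claim_equal_order_projects : Prop := ∀ (keys : List String) (order_hint : List String) (abbrev_ : List (String × String)), Dom_order_projects keys order_hint abbrev_ → Spec_order_projects keys order_hint abbrev_ (order_projects keys order_hint abbrev_)

-- ===== LEMMAS AND PROOFS =====

-- joint loop invariant: A's (seen, out) after a prefix of order_hint vs B's pos dict after the
-- same prefix: seen = out = (members of `keys` among pos's dict keys, in insertion order), pos's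
-- stored indices strictly increase along its items and stay below the running index.
lemma pv_loop_inv (keys : List String) (s2f : PySem.Dict String String) :
    ∀ (hint : List String) (i : Int) (out : List String) (d : PySem.Dict String Int),
    out = d.keys.filter (fun k => decide (k ∈ keys)) →
    d.keys.Nodup →
    d.items.Pairwise (fun p q => p.2 < q.2) →
    (∀ p ∈ d.items, p.2 < i) →
    (hint.foldl (fun (st : PySem.Set String × List String) short =>
        match s2f.get? short with
        | some full => if full ∈ keys ∧ full ∉ st.1 then (PySem.Set.add st.1 full, st.2 ++ [full]) else st
        | none => st) (out, out)
      = (((PySem.List.enumerate hint i).foldl (fun (d : PySem.Dict String Int) p =>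
            match s2f.get? p.2 with
            | some f => if ¬ d.contains f then d.insert f p.1 else d
            | none => d) d).keys.filter (fun k => decide (k ∈ keys)),
         ((PySem.List.enumerate hint i).foldl (fun (d : PySem.Dict String Int) p =>
            match s2f.get? p.2 with
            | some f => if ¬ d.contains f then d.insert f p.1 else d
            | none => d) d).keys.filter (fun k => decide (k ∈ keys))))
    ∧ ((PySem.List.enumerate hint i).foldl (fun (d : PySem.Dict String Int) p =>
          match s2f.get? p.2 with
          | some f => if ¬ d.contains f then d.insert f p.1 else d
          | none => d) d).keys.Nodup
    ∧ ((PySem.List.enumerate hint i).foldl (fun (d : PySem.Dict String Int) p =>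
          match s2f.get? p.2 with
          | some f => if ¬ d.contains f then d.insert f p.1 else d
          | none => d) d).items.Pairwise (fun p q => p.2 < q.2)
    ∧ ∀ p ∈ ((PySem.List.enumerate hint i).foldl (fun (d : PySem.Dict String Int) p =>
          match s2f.get? p.2 with
          | some f => if ¬ d.contains f then d.insert f p.1 else d
          | none => d) d).items, p.2 < i + hint.length := by
  intro hint
  induction hint with
  | nil =>
    intro i out d hout hnd hpw hb
    simp only [PySem.List.enumerate_nil, List.foldl_nil, List.length_nil]
    refine ⟨by rw [hout], hnd, hpw, fun p hp => by have := hb p hp; push_cast; omega⟩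
  | cons short rest ih =>
    intro i out d hout hnd hpw hb
    rw [PySem.List.enumerate_cons]
    simp only [List.foldl_cons, List.length_cons]
    cases hget : s2f.get? short with
    | none =>
      have H := ih (i + 1) out d hout hnd hpw (fun p hp => by have := hb p hp; omega)
      refine ⟨H.1, H.2.1, H.2.2.1, fun p hp => by have := H.2.2.2 p hp; push_cast at this ⊢; omega⟩
    | some full =>
      by_cases hmem : full ∈ d.keys
      · have hcont : d.contains full = true := by
          rw [PySem.Dict.contains_eq_decide_mem_keys]; simp [hmem]
        have hnotA : ¬ (full ∈ keys ∧ full ∉ out) := by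
          rintro ⟨h1, h2⟩
          exact h2 (by rw [hout]; simp [List.mem_filter, hmem, h1])
        simp only [hcont, not_true_eq_false, if_false, if_neg hnotA]
        have H := ih (i + 1) out d hout hnd hpw (fun p hp => by have := hb p hp; omega)
        refine ⟨H.1, H.2.1, H.2.2.1, fun p hp => by have := H.2.2.2 p hp; push_cast at this ⊢; omega⟩
      · have hcont : d.contains full = false := by
          rw [PySem.Dict.contains_eq_decide_mem_keys]; simp [hmem]
        have hfout : full ∉ out := by
          rw [hout]; simp [List.mem_filter]; intro h; exact absurd h hmem
        have hkeys' : (d.insert full i).keys = d.keys ++ [full] :=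
          PySem.Dict.keys_insert_of_not_contains d i hcont
        have hitems' : (d.insert full i).items = d.items ++ [(full, i)] :=
          PySem.Dict.items_insert_of_not_contains d i hcont
        have hnd' : (d.insert full i).keys.Nodup := by
          rw [hkeys', List.nodup_append]
          refine ⟨hnd, List.nodup_singleton _, ?_⟩
          intro a ha b hbmem heq
          have hb' : b = full := by simpa using hbmem
          exact hmem (hb' ▸ heq ▸ ha)
        have hpw' : (d.insert full i).items.Pairwise (fun p q => p.2 < q.2) := by
          rw [hitems', List.pairwise_append]
          refine ⟨hpw, List.pairwise_singleton _ _, fun p hp q hq => ?_⟩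
          simp only [List.mem_singleton] at hq
          subst hq
          exact hb p hp
        have hb' : ∀ p ∈ (d.insert full i).items, p.2 < i + 1 := by
          intro p hp
          rw [hitems'] at hp
          rcases List.mem_append.1 hp with h | h
          · have := hb p h; omega
          · simp only [List.mem_singleton] at h; subst h; omega
        simp only [hcont, Bool.false_eq_true, not_false_eq_true, if_true]
        by_cases hk : full ∈ keys
        · have hguard : full ∈ keys ∧ full ∉ out := ⟨hk, hfout⟩
          rw [if_pos hguard]
          have hadd : PySem.Set.add out full = out ++ [full] := PySem.Set.add_of_not_mem hfout
          have hout' : out ++ [full] = (d.insert full i).keys.filter (fun k => decide (k ∈ keys)) := by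
            rw [hkeys', List.filter_append, ← hout]; simp [hk]
          have H := ih (i + 1) (out ++ [full]) (d.insert full i) hout' hnd' hpw' hb'
          rw [hadd]
          refine ⟨H.1, H.2.1, H.2.2.1, fun p hp => by have := H.2.2.2 p hp; push_cast at this ⊢; omega⟩
        · rw [if_neg (fun h => hk h.1)]
          have hout' : out = (d.insert full i).keys.filter (fun k => decide (k ∈ keys)) := by
            rw [hkeys', List.filter_append, ← hout]; simp [hk]
          have H := ih (i + 1) out (d.insert full i) hout' hnd' hpw' hb'
          refine ⟨H.1, H.2.1, H.2.2.1, fun p hp => by have := H.2.2.2 p hp; push_cast at this ⊢; omega⟩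

-- ===== VERDICT (by name: the statement is the Claim_ definition above) =====
theorem order_projects_spec : Claim_equal_order_projects := by
  intro keys hint ab _hdom
  unfold Spec_order_projects
  show order_projects keys hint ab = order_projects_alt keys hint ab
  simp only [order_projects, order_projects_alt]
  rw [show (PySem.Set.empty : PySem.Set String) = ([] : List String) from rfl]
  obtain ⟨hAB, hndB, hpwB, hbB⟩ :=
    pv_loop_inv keys (pvShort2Full ab) hint 0 [] PySem.Dict.empty rfl
      (by rw [show (PySem.Dict.empty : PySem.Dict String Int).keys = [] from rfl]; exact List.nodup_nil)
      (by rw [show (PySem.Dict.empty : PySem.Dict String Int).items = [] from rfl]; exact List.Pairwise.nil)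
      (by intro p hp; rw [show (PySem.Dict.empty : PySem.Dict String Int).items = [] from rfl] at hp; exact absurd hp (by simp))
  set dB := (PySem.List.enumerate hint 0).foldl (fun (d : PySem.Dict String Int) p =>
    match (pvShort2Full ab).get? p.2 with
    | some f => if ¬ d.contains f then d.insert f p.1 else d
    | none => d) PySem.Dict.empty with hdB
  rw [hAB]
  set F := dB.keys.filter (fun k => decide (k ∈ keys)) with hF
  rw [show ((F, F) : List String × List String).2 = F from rfl]
  have hcontains : ∀ x : String, dB.contains x = true ↔ x ∈ dB.keys := by
    intro x; rw [PySem.Dict.contains_eq_decide_mem_keys]; simp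
  have hmemF : ∀ x, x ∈ F ↔ (x ∈ dB.keys ∧ x ∈ keys) := by
    intro x
    rw [hF, List.mem_filter]
    simp
  -- the two tails are sorts of the same list
  have hrest : keys.filter (fun k => !(PySem.Set.contains F k)) = keys.filter (fun k => !dB.contains k) := by
    refine List.filter_congr ?_
    intro k hk
    have : PySem.Set.contains F k = dB.contains k := by
      rw [PySem.Set.contains_eq_listContains]
      by_cases h : k ∈ dB.keys
      · simp [(hmemF k).2 ⟨h, hk⟩, (hcontains k).2 h]
      · have h1 : k ∉ F := fun hkF => h ((hmemF k).1 hkF).1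
        have h2 : dB.contains k = false := by
          cases hc : dB.contains k
          · rfl
          · exact absurd ((hcontains k).1 hc) h
        simp [h1, h2]
    rw [this]
  -- the hinted head: sorting the set by first-hint index reproduces F
  have hhead : PySem.List.sorted (PySem.Set.ofList (keys.filter (fun k => dB.contains k)))
      (fun k => dB.getD k 0) false = F := by
    have hperm : F.Perm (PySem.Set.ofList (keys.filter (fun k => dB.contains k)) : List String) := by
      have hndF : F.Nodup := hndB.filter _
      have hndS : (PySem.Set.ofList (keys.filter (fun k => dB.contains k)) : List String).Nodup :=
        PySem.Set.nodup_ofList _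
      refine (List.perm_ext_iff_of_nodup hndF hndS).2 ?_
      intro x
      rw [hmemF, PySem.Set.mem_ofList, List.mem_filter]
      constructor
      · rintro ⟨h1, h2⟩; exact ⟨h2, (hcontains x).2 h1⟩
      · rintro ⟨h1, h2⟩; exact ⟨(hcontains x).1 h2, h1⟩
    -- along F the stored first-hint indices strictly increase
    have hpwF : F.Pairwise (fun a b => dB.getD a 0 < dB.getD b 0) := by
      have hFitems : F = (dB.items.filter (fun p => decide (p.1 ∈ keys))).map Prod.fst := by
        rw [hF]
        simp only [PySem.Dict.keys]
        rw [List.filter_map]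
        rfl
      rw [hFitems, List.pairwise_map]
      have hsub : ∀ p ∈ dB.items.filter (fun p => decide (p.1 ∈ keys)), p ∈ dB.items :=
        fun p hp => List.mem_of_mem_filter hp
      refine (hpwB.filter (fun p => decide (p.1 ∈ keys))).imp_of_mem ?_
      intro p q hp hq hlt
      have hgp : dB.getD p.1 0 = p.2 :=
        PySem.Dict.getD_of_mem_items dB (show (p.1, p.2) ∈ dB.items from hsub p hp) hndB 0
      have hgq : dB.getD q.1 0 = q.2 :=
        PySem.Dict.getD_of_mem_items dB (show (q.1, q.2) ∈ dB.items from hsub q hq) hndB 0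
      rw [hgp, hgq]; exact hlt
    exact PySem.List.sorted_eq_of_perm_of_pairwise_lt _ F (fun k => dB.getD k 0) hperm hpwF
  rw [hrest, hhead]
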